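-- pv_equiv track=rewrite | github.com/htungitmo420/Finite-State-Machine | Finite-State-Machines-Task/python_fsm/1a.py | is_ab_ending
-- ===== SOURCE A (Python) =====
-- def is_ab_ending(string):
--     states = {
--         'start': 0,
--         'a': 1,
--         'ab': 2,
--         'invalid': 3
--     }
--
--     current_state = states['start']
--
--     for char in string:
--         if current_state == states['invalid']:
--             break
--
--         if char == 'a':
--             if current_state == states['start']:
--                 current_state = states['a']
--             elif current_state == states['a']:
--                 current_state = states['a']
--             elif current_state == states['ab']:
--                 current_state = states['a']
--         elif char == 'b':
--             if current_state == states['start']: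
--                 current_state = states['invalid']
--             elif current_state == states['a']:
--                 current_state = states['ab']
--             elif current_state == states['ab']:
--                 current_state = states['invalid']
--         else:
--             current_state = states['invalid']
--
--     return current_state == states['ab']
-- ===== SOURCE B (Python) =====
-- def is_ab_ending(string):
--     return (all(c in 'ab' for c in string)
--             and string.startswith('a')
--             and 'bb' not in string
--             and string.endswith('ab'))
-- ===== Notes on version B (the rewrite author's own statement) =====
-- stated objective: simpler
-- what changed: Replaced the explicit 4-state DFA loop (state dict plus per-character transition branches) by a conjunction of four independent string predicates: every character is one of the two alphabet letters, the string starts with the first letter, it contains no doubled second letter, and it ends with the accepting two-letter suffix.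
import Mathlib
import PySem

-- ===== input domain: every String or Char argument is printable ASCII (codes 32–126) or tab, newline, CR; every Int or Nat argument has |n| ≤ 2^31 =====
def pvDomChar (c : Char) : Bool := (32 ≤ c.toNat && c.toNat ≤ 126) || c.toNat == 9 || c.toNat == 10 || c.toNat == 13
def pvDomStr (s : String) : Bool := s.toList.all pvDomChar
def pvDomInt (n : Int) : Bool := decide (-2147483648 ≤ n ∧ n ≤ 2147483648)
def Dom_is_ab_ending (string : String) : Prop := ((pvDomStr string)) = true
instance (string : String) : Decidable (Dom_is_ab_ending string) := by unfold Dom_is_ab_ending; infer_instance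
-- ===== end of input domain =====

-- B replaces A's explicit 4-state DFA loop by a conjunction of four independent
-- string predicates (simpler decomposition, same O(n) cost).

-- ===== PORT A =====
-- the 'states' dict of A (insertion order, all keys present)
def pvStates : PySem.Dict String Int :=
  PySem.Dict.ofList [("start", 0), ("a", 1), ("ab", 2), ("invalid", 3)]

-- the for-loop of A over the characters; the 'break' returns the state unchanged
def pvLoopA (s : Int) : List Char → Int
  | [] => s
  | c :: cs =>
    if s == pvStates.getD "invalid" 0 then s
    else
      let s' :=
        if c == 'a' then
          if s == pvStates.getD "start" 0 then pvStates.getD "a" 0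
          else if s == pvStates.getD "a" 0 then pvStates.getD "a" 0
          else if s == pvStates.getD "ab" 0 then pvStates.getD "a" 0
          else s
        else if c == 'b' then
          if s == pvStates.getD "start" 0 then pvStates.getD "invalid" 0
          else if s == pvStates.getD "a" 0 then pvStates.getD "ab" 0
          else if s == pvStates.getD "ab" 0 then pvStates.getD "invalid" 0
          else s
        else pvStates.getD "invalid" 0
      pvLoopA s' cs

def is_ab_ending (string : String) : Bool :=
  pvLoopA (pvStates.getD "start" 0) string.toList == pvStates.getD "ab" 0

-- ===== PORT B =====
def is_ab_ending_alt (string : String) : Bool :=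
  string.toList.all (fun c => PySem.Str.isIn (String.ofList [c]) "ab")
  && PySem.Str.startswith string "a"
  && !(PySem.Str.isIn "bb" string)
  && PySem.Str.endswith string "ab"

-- ===== PRECONDITION & SPEC =====
def Spec_is_ab_ending (string : String) (out : Bool) : Prop := out = is_ab_ending_alt string
instance (string : String) (out : Bool) : Decidable (Spec_is_ab_ending string out) := by unfold Spec_is_ab_ending; infer_instance

-- ===== CLAIM (what is proved, stated in full; the proofs are below) =====
def Claim_equal_is_ab_ending : Prop := ∀ (string : String), Dom_is_ab_ending string → Spec_is_ab_ending string (is_ab_ending string)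

-- ===== LEMMAS AND PROOFS =====

-- proof-side helpers
def pvInAB (c : Char) : Bool := c == 'a' || c == 'b'

def pvNoBB : List Char → Bool
  | [] => true
  | c :: cs => !(c == 'b' && cs.head? == some 'b') && pvNoBB cs

theorem pvStates_start : pvStates.getD "start" 0 = 0 := by decide
theorem pvStates_a : pvStates.getD "a" 0 = 1 := by decide
theorem pvStates_ab : pvStates.getD "ab" 0 = 2 := by decide
theorem pvStates_invalid : pvStates.getD "invalid" 0 = 3 := by decide

theorem pvLoopA_three : ∀ cs, pvLoopA 3 cs = 3 := by
  intro cs; cases cs <;> simp [pvLoopA, pvStates_invalid]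

-- step lemmas for the DFA loop
theorem pvLoopA_one_cons (c : Char) (cs : List Char) :
    pvLoopA 1 (c :: cs) = if c = 'a' then pvLoopA 1 cs else if c = 'b' then pvLoopA 2 cs else pvLoopA 3 cs := by
  by_cases h1 : c = 'a' <;> by_cases h2 : c = 'b' <;>
    simp [pvLoopA, pvStates_start, pvStates_a, pvStates_ab, pvStates_invalid, h1, h2]

theorem pvLoopA_two_cons (c : Char) (cs : List Char) :
    pvLoopA 2 (c :: cs) = if c = 'a' then pvLoopA 1 cs else pvLoopA 3 cs := by
  by_cases h1 : c = 'a' <;> by_cases h2 : c = 'b' <;>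
    simp [pvLoopA, pvStates_start, pvStates_a, pvStates_ab, pvStates_invalid, h1, h2]

theorem pvLoopA_zero_cons (c : Char) (cs : List Char) :
    pvLoopA 0 (c :: cs) = if c = 'a' then pvLoopA 1 cs else pvLoopA 3 cs := by
  by_cases h1 : c = 'a' <;> by_cases h2 : c = 'b' <;>
    simp [pvLoopA, pvStates_start, pvStates_a, pvStates_ab, pvStates_invalid, h1, h2]

-- characterization of the DFA run from states 1 ('a') and 2 ('ab')
theorem pvLoopA_char : ∀ cs : List Char,
    ((pvLoopA 1 cs = 2) ↔ (cs.all pvInAB = true ∧ pvNoBB cs = true ∧ cs.getLast? = some 'b'))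
    ∧ ((pvLoopA 2 cs = 2) ↔ (cs.head? ≠ some 'b' ∧ cs.all pvInAB = true ∧ pvNoBB cs = true
          ∧ (cs = [] ∨ cs.getLast? = some 'b'))) := by
  intro cs
  induction cs with
  | nil => exact ⟨by decide, by simp [pvLoopA, pvNoBB]⟩
  | cons c cs ih =>
    obtain ⟨ih1, ih2⟩ := ih
    by_cases hca : c = 'a'
    · subst hca
      cases cs with
      | nil => exact ⟨by decide, by decide⟩
      | cons d ds =>
        constructor
        · rw [pvLoopA_one_cons, if_pos rfl, ih1]
          simp only [pvNoBB, pvInAB, List.all_cons, List.getLast?_cons_cons]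
          simp <;> tauto
        · rw [pvLoopA_two_cons, if_pos rfl, ih1]
          simp only [pvNoBB, pvInAB, List.all_cons, List.getLast?_cons_cons]
          simp <;> tauto
    · by_cases hcb : c = 'b'
      · subst hcb
        cases cs with
        | nil => exact ⟨by decide, by decide⟩
        | cons d ds =>
          constructor
          · rw [pvLoopA_one_cons, if_neg (by decide), if_pos rfl, ih2]
            simp only [pvNoBB, pvInAB, List.all_cons, List.getLast?_cons_cons]
            simp <;> tauto
          · rw [pvLoopA_two_cons, if_neg (by decide), pvLoopA_three]
            simp
      · constructor
        · rw [pvLoopA_one_cons, if_neg hca, if_neg hcb, pvLoopA_three]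
          simp [pvInAB, hca, hcb]
        · rw [pvLoopA_two_cons, if_neg hca, pvLoopA_three]
          simp [pvInAB, hca, hcb]

-- pvNoBB = no "bb" infix
theorem pvNoBB_iff : ∀ cs : List Char, pvNoBB cs = true ↔ ¬ (['b','b'] <:+: cs) := by
  intro cs
  induction cs with
  | nil => exact iff_of_true rfl (by simp)
  | cons c cs ih =>
    rw [List.infix_cons_iff]
    simp only [pvNoBB, Bool.and_eq_true, Bool.not_eq_true', ih]
    constructor
    · rintro ⟨h1, h2⟩ h
      rcases h with h | h
      · rcases h with ⟨t, ht⟩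
        cases cs with
        | nil => simp at ht
        | cons d ds =>
          simp at ht
          simp [← ht.1, ← ht.2.1] at h1
      · exact h2 h
    · intro h
      refine ⟨?_, fun hi => h (Or.inr hi)⟩
      by_contra hb
      simp only [Bool.not_eq_false, Bool.and_eq_true, beq_iff_eq] at hb
      cases cs with
      | nil => simp at hb
      | cons d ds =>
        simp at hb
        exact h (Or.inl ⟨ds, by simp [hb.1, hb.2]⟩)

-- suffix ['a','b'] of h::cs vs last char, under the DFA invariants
theorem pvEnds_char : ∀ (cs : List Char) (h : Char), pvInAB h = true →
    (h = 'b' → cs ≠ []) → pvNoBB (h :: cs) = true → cs.all pvInAB = true →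
    ((['a','b'] <:+ (h :: cs)) ↔ (h :: cs).getLast? = some 'b') := by
  intro cs
  induction cs with
  | nil =>
    intro h hab hne _ _
    constructor
    · rintro ⟨t, ht⟩
      have := congrArg List.length ht; simp at this
    · intro hl
      simp at hl
      exact absurd rfl (hne hl)
  | cons d ds ih =>
    intro h hab hne hbb hall
    cases ds with
    | nil =>
      simp only [pvNoBB, Bool.and_eq_true, Bool.not_eq_true'] at hbb
      simp only [List.all_cons, Bool.and_eq_true] at hall
      constructor
      · intro hs
        rcases List.suffix_cons_iff.mp hs with heq | hs
        · simp at heq; simp [← heq.2]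
        · rcases hs with ⟨t, ht⟩
          have := congrArg List.length ht; simp at this
      · intro hl
        simp only [List.getLast?_cons_cons] at hl
        simp at hl
        have hd : h = 'a' := by
          rcases (by simpa [pvInAB] using hab : h = 'a' ∨ h = 'b') with h1 | h1
          · exact h1
          · subst h1; simp [hl] at hbb
        subst hd; subst hl
        exact List.suffix_refl _
    | cons e es =>
      have hbb' : pvNoBB (d :: e :: es) = true := by
        simp only [pvNoBB, Bool.and_eq_true] at hbb ⊢
        exact ⟨hbb.2.1, hbb.2.2⟩
      have hall' : (e :: es).all pvInAB = true := by
        simp only [List.all_cons, Bool.and_eq_true] at hall ⊢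
        exact ⟨hall.2.1, hall.2.2⟩
      have hdab : pvInAB d = true := by
        simp only [List.all_cons, Bool.and_eq_true] at hall
        exact hall.1
      have ihd := ih d hdab (by intro _ hn; cases hn) hbb' hall'
      constructor
      · intro hs
        rcases List.suffix_cons_iff.mp hs with heq | hs
        · exfalso; have := congrArg List.length heq; simp at this
        · simp only [List.getLast?_cons_cons]
          simpa [List.getLast?_cons_cons] using ihd.mp hs
      · intro hl
        simp only [List.getLast?_cons_cons] at hl
        exact (List.suffix_cons_iff.mpr (Or.inr (ihd.mpr (by simpa [List.getLast?_cons_cons] using hl))))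

theorem pvSingle (c : Char) : PySem.Str.isIn (String.ofList [c]) "ab" = pvInAB c := by
  rw [Bool.eq_iff_iff, PySem.Str.isIn_iff_infix]
  have h1 : (String.ofList [c]).toList = [c] := by simp
  have h2 : ("ab" : String).toList = ['a','b'] := by simp
  rw [h1, h2]
  simp [List.infix_cons_iff, List.cons_prefix_cons, pvInAB]

-- the two programs agree, at the level of character lists
theorem pvMainList : ∀ l : List Char,
    ((pvLoopA 0 l = 2) ↔
      (l.all pvInAB = true ∧ ['a'] <+: l ∧ ¬ (['b','b'] <:+: l) ∧ ['a','b'] <:+ l)) := by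
  intro l
  cases l with
  | nil =>
    constructor
    · intro h; simp [pvLoopA] at h
    · rintro ⟨-, hpre, -⟩
      exact absurd (List.prefix_nil.mp hpre) (by simp)
  | cons c cs =>
    rw [pvLoopA_zero_cons]
    by_cases hc : c = 'a'
    · subst hc
      rw [if_pos rfl, (pvLoopA_char cs).1]
      by_cases hA : cs.all pvInAB = true
      · by_cases hB : pvNoBB cs = true
        · have hends := pvEnds_char cs 'a' (by decide) (by simp) (by simp [pvNoBB, hB]) hA
          constructor
          · rintro ⟨-, -, h3⟩
            have hlast : ('a' :: cs).getLast? = some 'b' := by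
              cases cs with
              | nil => simp at h3
              | cons d ds => simpa [List.getLast?_cons_cons] using h3
            refine ⟨by simp [hA, pvInAB], ⟨cs, rfl⟩, ?_, hends.mpr hlast⟩
            rw [List.infix_cons_iff]
            push Not
            refine ⟨?_, (pvNoBB_iff cs).mp hB⟩
            intro hpre
            rcases List.cons_prefix_cons.mp hpre with ⟨h', -⟩
            exact absurd h'.symm (by decide)
          · rintro ⟨-, -, -, h4⟩
            refine ⟨hA, hB, ?_⟩
            have h4' := hends.mp h4
            cases cs with
            | nil => simp at h4'
            | cons d ds => simpa [List.getLast?_cons_cons] using h4'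
        · constructor
          · rintro ⟨-, h2, -⟩; exact absurd h2 hB
          · rintro ⟨-, -, h3, -⟩
            exact absurd ((pvNoBB_iff cs).mpr fun hi => h3 (hi.trans (List.suffix_cons 'a' cs).isInfix)) hB
      · constructor
        · rintro ⟨h1, -⟩; exact absurd h1 hA
        · rintro ⟨h1, -⟩
          exfalso; apply hA
          simp only [List.all_cons, Bool.and_eq_true] at h1
          exact h1.2
    · rw [if_neg hc, pvLoopA_three]
      constructor
      · intro h; exact absurd h (by decide)
      · rintro ⟨-, hpre, -⟩
        rcases List.cons_prefix_cons.mp hpre with ⟨h', -⟩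
        exact (hc h'.symm).elim

theorem pvSingleChars (c : Char) : PySem.Chars.isIn (String.ofList [c]).toList ['a','b'] = pvInAB c := by
  rw [← pvSingle c, Bool.eq_iff_iff, PySem.Str.isIn_iff_infix, PySem.Chars.isIn_iff_infix]
  have h2 : ("ab" : String).toList = ['a','b'] := by simp
  rw [h2]

theorem pvMain : ∀ s : String, is_ab_ending s = is_ab_ending_alt s := by
  intro s
  rw [Bool.eq_iff_iff]
  unfold is_ab_ending is_ab_ending_alt
  rw [pvStates_start, pvStates_ab]
  have ha : ("a" : String).toList = ['a'] := by simp
  have hab : ("ab" : String).toList = ['a','b'] := by simp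
  have hbb : ("bb" : String).toList = ['b','b'] := by simp
  rw [beq_iff_eq]
  rw [pvMainList s.toList]
  simp only [Bool.and_eq_true, Bool.not_eq_true',
    PySem.Str.startswith_eq, PySem.Str.endswith_eq, PySem.Str.isIn_eq, ha, hab, hbb, pvSingleChars]
  rw [← Bool.not_eq_true (PySem.Chars.isIn ['b','b'] s.toList)]
  simp only [PySem.Chars.startswith_iff, PySem.Chars.endswith_iff, PySem.Chars.isIn_iff_infix]
  tauto

-- ===== VERDICT (by name: the statement is the Claim_ definition above) =====
theorem is_ab_ending_spec : Claim_equal_is_ab_ending := by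
  intro s _
  unfold Spec_is_ab_ending
  exact pvMain s
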